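-- pv_equiv track=rewrite | github.com/MollyIKnight/AccountableRingSigDDH | R4protocol.py | encoding_l
-- ===== SOURCE A (Python) =====
-- n = 3
--
-- m = 2
--
-- def encoding_l(l):
--     nary_l = []
--     while l:
--         lowest_bit = l % n
--         l = int(l/n)
--         nary_l.append(lowest_bit)
--
--     if len(nary_l) < m:
--         for _ in range(m-len(nary_l)):
--             nary_l.append(0)
--
--     dlji = []
--     for j in range(m):
--         row_bit = []
--         for i in range(n):
--             if nary_l[j]==i:
--                 row_bit.append(1)
--             else:
--                 row_bit.append(0)
--         dlji.append(row_bit)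
--     return(dlji)
-- ===== SOURCE B (Python) =====
-- n = 3
--
-- m = 2
--
-- def encoding_l(l):
--     # Compute exactly the first m base-n digits in one fixed-length loop,
--     # building each one-hot row as we go (no while-loop, no padding branch).
--     cur = l
--     dlji = []
--     for _ in range(m):
--         d = cur % n
--         cur = int(cur / n)
--         dlji.append([1 if i == d else 0 for i in range(n)])
--     return dlji
-- ===== Notes on version B (the rewrite author's own statement) =====
-- stated objective: simpler
-- what changed: Replaces the unbounded while-loop digit extraction plus padding branch and separate one-hot pass with a single fixed-length loop over the m positions that computes each digit and its one-hot row directly.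
import Mathlib
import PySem

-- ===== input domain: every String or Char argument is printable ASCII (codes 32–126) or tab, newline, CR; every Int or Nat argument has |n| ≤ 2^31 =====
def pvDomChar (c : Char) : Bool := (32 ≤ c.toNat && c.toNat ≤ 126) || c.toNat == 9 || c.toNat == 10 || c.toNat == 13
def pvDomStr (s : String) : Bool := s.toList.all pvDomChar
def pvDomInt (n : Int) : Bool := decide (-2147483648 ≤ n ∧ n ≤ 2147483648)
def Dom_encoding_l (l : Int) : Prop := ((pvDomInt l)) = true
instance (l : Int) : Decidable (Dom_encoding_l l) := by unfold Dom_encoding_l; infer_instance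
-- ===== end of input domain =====

-- B replaces A's unbounded while-loop + padding branch + separate one-hot pass by one
-- fixed-length loop over the m positions building each one-hot row directly (objective: simpler).

-- ===== PORT A =====
-- termination helper for the 'while l:' loop: |int(l/3)| < |l| for l ≠ 0
theorem pvNaryDec (l : Int) (h : ¬ l = 0) :
    (PySem.Int.truncdiv l 3).natAbs < l.natAbs := by
  show ((Int.tdiv l 3)).natAbs < l.natAbs
  rw [Int.natAbs_tdiv]
  exact Nat.div_lt_self (Int.natAbs_pos.mpr h) (by norm_num)

-- while l: lowest_bit = l % n; l = int(l/n); nary_l.append(lowest_bit)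
-- int(l/n) ported as PySem.Int.truncdiv (exact for |l| < 2^53; Dom bounds |l| ≤ 2^31)
def naryLoop (l : Int) : List Int :=
  if h : l = 0 then []
  else PySem.Int.mod l 3 :: naryLoop (PySem.Int.truncdiv l 3)
termination_by l.natAbs
decreasing_by exact pvNaryDec l h

def encoding_l (l : Int) : List (List Int) :=
  let nary_l := naryLoop l
  -- if len(nary_l) < m: append m - len(nary_l) zeros
  let nary_l := if nary_l.length < 2 then nary_l ++ List.replicate (2 - nary_l.length) 0 else nary_l
  -- for j in range(m): row_bit = [1 if nary_l[j]==i else 0 for i in range(n)]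
  -- nary_l[j] is always in range after the padding, so getD's default is never used
  (List.range 2).map (fun j =>
    (List.range 3).map (fun i => if nary_l.getD j 0 = (i : Int) then (1 : Int) else 0))

-- ===== PORT B =====
def encoding_l_alt (l : Int) : List (List Int) :=
  ((List.range 2).foldl (fun (st : Int × List (List Int)) _ =>
      let d := PySem.Int.mod st.1 3
      (PySem.Int.truncdiv st.1 3,
       st.2 ++ [(List.range 3).map (fun i => if (i : Int) = d then (1 : Int) else 0)]))
    (l, [])).2

-- ===== PRECONDITION & SPEC =====
def Spec_encoding_l (l : Int) (out : List (List Int)) : Prop := out = encoding_l_alt l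
instance (l : Int) (out : List (List Int)) : Decidable (Spec_encoding_l l out) := by unfold Spec_encoding_l; infer_instance

-- ===== CLAIM (what is proved, stated in full; the proofs are below) =====
def Claim_equal_encoding_l : Prop := ∀ (l : Int), Dom_encoding_l l → Spec_encoding_l l (encoding_l l)

-- ===== LEMMAS AND PROOFS =====
theorem naryLoop_zero : naryLoop 0 = [] := by rw [naryLoop]; simp

theorem alt_eq (l : Int) :
    encoding_l_alt l =
      [(List.range 3).map (fun i => if (i : Int) = PySem.Int.mod l 3 then (1 : Int) else 0),
       (List.range 3).map (fun i =>
         if (i : Int) = PySem.Int.mod (PySem.Int.truncdiv l 3) 3 then (1 : Int) else 0)] := rfl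

theorem row_comm (d : Int) :
    ((List.range 3).map (fun i => if d = (i : Int) then (1 : Int) else 0)) =
    ((List.range 3).map (fun i => if (i : Int) = d then (1 : Int) else 0)) := by
  simp only [List.map_inj_left]
  intro i _
  simp [eq_comm]

theorem a_eq (l : Int) :
    encoding_l l =
      [(List.range 3).map (fun i => if (i : Int) = PySem.Int.mod l 3 then (1 : Int) else 0),
       (List.range 3).map (fun i =>
         if (i : Int) = PySem.Int.mod (PySem.Int.truncdiv l 3) 3 then (1 : Int) else 0)] := by
  by_cases h0 : l = 0
  · subst h0; simp only [encoding_l, naryLoop_zero]; decide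
  · have hl : naryLoop l = PySem.Int.mod l 3 :: naryLoop (PySem.Int.truncdiv l 3) := by
      rw [naryLoop]; simp [h0]
    by_cases h1 : PySem.Int.truncdiv l 3 = 0
    · have ht : naryLoop (PySem.Int.truncdiv l 3) = [] := by rw [naryLoop]; simp [h1]
      simp only [encoding_l, hl, h1, naryLoop_zero]
      rw [← row_comm, ← row_comm]
      norm_num [List.range_succ]
    · have ht : naryLoop (PySem.Int.truncdiv l 3) =
          PySem.Int.mod (PySem.Int.truncdiv l 3) 3 ::
            naryLoop (PySem.Int.truncdiv (PySem.Int.truncdiv l 3) 3) := by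
        rw [naryLoop]; simp [h1]
      simp only [encoding_l, hl, ht]
      rw [← row_comm, ← row_comm]
      norm_num [List.range_succ]

-- ===== VERDICT (by name: the statement is the Claim_ definition above) =====
theorem encoding_l_spec : Claim_equal_encoding_l := by
  intro l _
  show encoding_l l = encoding_l_alt l
  rw [a_eq, alt_eq]
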